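-- pv_equiv track=rewrite | github.com/TakutoOgawa-ui/flow-test | nn/nn_matrix.py | mat_shape
-- ===== SOURCE A (Python) =====
-- from typing import List, Tuple
--
-- Matrix = List[List[float]]
--
-- def mat_shape(W: Matrix) -> Tuple[int, int]:
--     """
--     行列 W の形（行数, 列数）を返す。
--     行の長さが不揃いならエラーにする。
--     """
--     if len(W) == 0:
--         return (0, 0)
--
--     #各列の長さ測定
--     cols = len(W[0])
--     for row in W:
--         if len(row) != cols:
--             raise ValueError("Matrix rows must have the same length.")
--     return (len(W), cols)
-- ===== SOURCE B (Python) =====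
-- def mat_shape(W):
--     # Divide and conquer: the shape of a block is the combination of the shapes
--     # of its two halves; halves combine only if their column counts agree.
--     if not W:
--         return (0, 0)
--
--     def shape(lo, hi):  # shape of the non-empty block W[lo:hi]
--         if hi - lo == 1:
--             return (1, len(W[lo]))
--         mid = (lo + hi) // 2
--         r1, c1 = shape(lo, mid)
--         r2, c2 = shape(mid, hi)
--         if c1 != c2:
--             raise ValueError("Matrix rows must have the same length.")
--         return (r1 + r2, c1)
--
--     return shape(0, len(W))
-- ===== Notes on version B (the rewrite author's own statement) =====
-- stated objective: alternative
-- what changed: B checks uniformity by divide and conquer: it recursively computes the shapes of the two halves of the matrix and combines them when their column counts agree, instead of A's single left-to-right loop comparing every row to len(W[0]).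
import Mathlib
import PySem

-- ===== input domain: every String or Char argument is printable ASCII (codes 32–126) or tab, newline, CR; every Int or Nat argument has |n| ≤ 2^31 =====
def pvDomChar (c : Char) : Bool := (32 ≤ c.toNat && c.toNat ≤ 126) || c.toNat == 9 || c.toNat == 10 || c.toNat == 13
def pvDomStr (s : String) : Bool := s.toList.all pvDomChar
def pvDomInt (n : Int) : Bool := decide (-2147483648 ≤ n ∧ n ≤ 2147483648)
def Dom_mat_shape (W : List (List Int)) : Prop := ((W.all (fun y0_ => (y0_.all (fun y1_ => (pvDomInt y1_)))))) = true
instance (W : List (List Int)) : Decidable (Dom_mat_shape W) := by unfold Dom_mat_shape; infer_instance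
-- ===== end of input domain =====

-- B replaces A's left-to-right reference-length loop with divide and conquer:
-- the shapes of the two halves are computed recursively and combined when their column counts agree (alternative, same cost).


-- ===== PORT A =====
-- the 'for row in W' loop: false = the ValueError branch was taken
def matShapeLoop (cols : Int) : List (List Int) → Bool
  | [] => true
  | row :: rest => if (row.length : Int) ≠ cols then false else matShapeLoop cols rest

def mat_shape (W : List (List Int)) : Int × Int :=
  match W with
  | [] => (0, 0)
  | r :: _ =>
    let cols : Int := (r.length : Int)
    if matShapeLoop cols W then ((W.length : Int), cols) else (0, 0)  -- else: raises ValueError (outside Pre_)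

-- ===== PORT B =====
-- B's inner 'shape(lo, hi)' on the indexed block W[lo:hi], ported as recursion on that block;
-- fuel = block length bounds the recursion depth (each recursive call strictly shrinks the block)
def matShapeHalves (fuel : Nat) (l : List (List Int)) : Int × Int :=
  match fuel with
  | 0 => (1, ((l.headD []).length : Int))  -- unreachable for fuel ≥ l.length ≥ 1
  | fuel + 1 =>
    if l.length ≤ 1 then (1, ((l.headD []).length : Int))
    else
      let mid := l.length / 2
      let (r1, c1) := matShapeHalves fuel (l.take mid)
      let (r2, c2) := matShapeHalves fuel (l.drop mid)
      if c1 ≠ c2 then (0, 0)  -- raises ValueError (outside Pre_)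
      else (r1 + r2, c1)

def mat_shape_alt (W : List (List Int)) : Int × Int :=
  if W = [] then (0, 0) else matShapeHalves W.length W

-- ===== PRECONDITION & SPEC =====
-- Pre_ excludes exactly the inputs with unequal row lengths, on which both A and B raise ValueError.
def Pre_mat_shape (W : List (List Int)) : Prop :=
  ∀ r ∈ W, r.length = (W.headD []).length
instance (W : List (List Int)) : Decidable (Pre_mat_shape W) := by unfold Pre_mat_shape; infer_instance

def pvWitness_mat_shape : List (List Int) := [[1, 2], [3, 4]]

def Spec_mat_shape (W : List (List Int)) (out : Int × Int) : Prop := out = mat_shape_alt W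
instance (W : List (List Int)) (out : Int × Int) : Decidable (Spec_mat_shape W out) := by unfold Spec_mat_shape; infer_instance

-- ===== CLAIM (what is proved, stated in full; the proofs are below) =====
def Claim_equal_mat_shape : Prop := ∀ (W : List (List Int)), Dom_mat_shape W → Pre_mat_shape W → Spec_mat_shape W (mat_shape W)

-- ===== LEMMAS AND PROOFS =====
lemma matShapeLoop_true (cols : Int) (l : List (List Int))
    (h : ∀ r ∈ l, (r.length : Int) = cols) : matShapeLoop cols l = true := by
  induction l with
  | nil => rfl
  | cons r rest ih =>
    simp only [matShapeLoop]
    rw [if_neg (by simpa using h r (by simp))]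
    exact ih (fun r hr => h r (by simp [hr]))

-- on a non-empty uniform block (with enough fuel), the divide-and-conquer returns
-- (row count, the common length)
lemma matShapeHalves_uniform (c : Int) :
    ∀ (fuel : Nat) (l : List (List Int)), l ≠ [] → l.length ≤ fuel →
      (∀ r ∈ l, (r.length : Int) = c) →
      matShapeHalves fuel l = ((l.length : Int), c) := by
  intro fuel
  induction fuel with
  | zero =>
    intro l hne hle _
    cases l with
    | nil => exact absurd rfl hne
    | cons _ _ => simp at hle
  | succ fuel ih =>
    intro l hne hle hu
    rw [matShapeHalves]
    by_cases h1 : l.length ≤ 1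
    · rw [if_pos h1]
      match l, hne with
      | r :: rest, _ =>
        have hrest : rest = [] := by
          cases rest with
          | nil => rfl
          | cons _ _ => simp at h1
        subst hrest
        simp [hu r (by simp)]
    · rw [if_neg h1]
      have hlen : 2 ≤ l.length := by omega
      have hmid1 : 1 ≤ l.length / 2 := by omega
      have hmid2 : l.length / 2 < l.length := by omega
      have ht := ih (l.take (l.length / 2))
        (List.ne_nil_of_length_pos (by simp only [List.length_take]; omega))
        (by simp only [List.length_take]; omega)
        (fun r hr => hu r (List.mem_of_mem_take hr))
      have hd := ih (l.drop (l.length / 2))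
        (List.ne_nil_of_length_pos (by simp only [List.length_drop]; omega))
        (by simp only [List.length_drop]; omega)
        (fun r hr => hu r (List.mem_of_mem_drop hr))
      simp only [ht, hd, List.length_take, List.length_drop]
      rw [if_neg (by simp)]
      rw [Prod.mk.injEq]
      refine ⟨?_, rfl⟩
      have hminor : min (l.length / 2) l.length = l.length / 2 := by omega
      rw [hminor]
      push_cast
      omega

-- ===== VERDICT (by name: the statement is the Claim_ definition above) =====
theorem mat_shape_spec : Claim_equal_mat_shape := by
  intro W _ hpre
  unfold Spec_mat_shape mat_shape_alt
  match W with
  | [] => simp [mat_shape]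
  | r :: rest =>
    have hall : ∀ s ∈ r :: rest, (s.length : Int) = (r.length : Int) := by
      intro s hs; have := hpre s hs; simp only [List.headD_cons] at this; exact_mod_cast this
    simp only [mat_shape]
    rw [matShapeLoop_true _ _ hall, if_pos rfl]
    rw [if_neg (show ¬((r :: rest : List (List Int)) = []) by simp)]
    rw [matShapeHalves_uniform _ _ _ (by simp) (le_refl _) hall]
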